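-- pv_equiv track=rewrite | github.com/SquirtlesAlgorithmStudy/SquirtlesAlgorithmStudy-Hard | 민서/행렬과연산.py | solution
-- ===== SOURCE A (Python) =====
-- from collections import deque
--
-- def solution(rc, operations):
--     R = len(rc)
--     C = len(rc[0])
--     lcol = deque([rc[i][0] for i in range(R)])
--     rcol = deque([rc[i][-1] for i in range(R)])
--     rows = deque([deque([rc[i][j] for j in range(1, C - 1)]) for i in range(R)])
--     for op in operations:
--         if op == "ShiftRow":
--             lcol.rotate(1)
--             rcol.rotate(1)
--             rows.rotate(1)
--         elif op == "Rotate":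
--             rows[0].appendleft(lcol.popleft())
--             rcol.appendleft(rows[0].pop())
--             rows[-1].append(rcol.pop())
--             lcol.append(rows[-1].popleft())
--     answer = [[0] * C for _ in range(R)]
--     for i, n in enumerate(lcol):
--         answer[i][0] = n
--     for i, n in enumerate(rcol):
--         answer[i][-1] = n
--     for i, r in enumerate(rows):
--         for j, n in enumerate(r):
--             answer[i][j + 1] = n
--     return answer
-- ===== SOURCE B (Python) =====
-- def solution(rc, operations):
--     C = len(rc[0])
--     # each row contributes its first entry, its inner entries 1..C-2 and its last entry
--     g = [[row[0]] + row[1:C - 1] + [row[-1]] for row in rc]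
--     for op in operations:
--         if op == "ShiftRow":
--             g = [g[-1]] + g[:-1]
--         elif op == "Rotate":
--             top = [g[1][0]] + g[0][:-1]
--             bottom = g[-1][1:] + [g[-2][-1]]
--             mid = [[g[i + 1][0]] + g[i][1:-1] + [g[i - 1][-1]]
--                    for i in range(1, len(g) - 1)]
--             g = [top] + mid + [bottom]
--     return g
-- ===== Notes on version B (the rewrite author's own statement) =====
-- stated objective: simpler
-- what changed: B keeps the whole matrix as one list of rows (each row reduced to its C relevant entries once, up front) and rebuilds it functionally per operation (ShiftRow = move last row to front; Rotate = shift the outer border one step clockwise row-by-row), instead of A's three-deque decomposition (left column, right column, inner rows) with mutating rotate/pop/append and a final zero-matrix write-back pass.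
-- outside the precondition, e.g. on solution([[1], [2]], ['Rotate']): A returns [[1], [1]], B returns [[2, 1], [2, 1]]; on solution([[1, 2, 3]], ['Rotate']): A returns [[1, 3, 2]], B raises IndexError
import Mathlib
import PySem

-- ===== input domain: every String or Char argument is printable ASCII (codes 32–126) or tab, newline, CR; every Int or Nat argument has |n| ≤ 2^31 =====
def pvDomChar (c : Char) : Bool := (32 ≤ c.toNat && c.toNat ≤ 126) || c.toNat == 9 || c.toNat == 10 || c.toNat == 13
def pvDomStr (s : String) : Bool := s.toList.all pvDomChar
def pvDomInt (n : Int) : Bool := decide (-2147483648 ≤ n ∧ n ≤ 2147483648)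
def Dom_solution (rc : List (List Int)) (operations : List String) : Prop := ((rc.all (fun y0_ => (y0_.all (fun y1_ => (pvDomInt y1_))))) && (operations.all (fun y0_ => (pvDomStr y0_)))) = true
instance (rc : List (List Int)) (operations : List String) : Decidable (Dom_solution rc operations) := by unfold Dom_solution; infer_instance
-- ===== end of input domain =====

-- B rebuilds the matrix functionally per operation (one list of rows, border shifted clockwise) instead of
-- A's three mutable deques (left column, right column, inner rows); objective: simpler, same exact values on Pre_.

-- ===== PORT A =====
-- deque.rotate(1): move the last element to the front (no-op on the empty deque)
def pyRot1 {α : Type} (l : List α) : List α :=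
  match l.getLast? with
  | none => []
  | some x => x :: l.dropLast

-- the body of A's `for op in operations` loop, acting on the state (lcol, rcol, rows);
-- deque popleft/appendleft/pop/append are tail/cons/dropLast/++[·]; the `D 0`/`D []` defaults are
-- never hit under Pre_ (Python would raise IndexError there)
def stepA (s : List Int × List Int × List (List Int)) (op : String) :
    List Int × List Int × List (List Int) :=
  if op = "ShiftRow" then
    (pyRot1 s.1, pyRot1 s.2.1, pyRot1 s.2.2)
  else if op = "Rotate" then
    let l := s.1
    let r := s.2.1
    let m := s.2.2
    let x := l.headD 0                    -- lcol.popleft()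
    let l1 := l.tail
    let row0 := x :: m.headD []           -- rows[0].appendleft(x)
    let y := row0.getLastD 0              -- rows[0].pop()
    let row0' := row0.dropLast
    let r1 := y :: r                      -- rcol.appendleft(y)
    let m1 := row0' :: m.tail
    let z := r1.getLastD 0                -- rcol.pop()
    let r2 := r1.dropLast
    let rowL := m1.getLastD [] ++ [z]     -- rows[-1].append(z)
    let w := rowL.headD 0                 -- rows[-1].popleft()
    let rowL' := rowL.tail
    let m2 := m1.dropLast ++ [rowL']
    let l2 := l1 ++ [w]                   -- lcol.append(w)
    (l2, r2, m2)
  else s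

def solution (rc : List (List Int)) (operations : List String) : List (List Int) :=
  let R := rc.length
  let C := (rc.headD []).length                                   -- len(rc[0]); rc ≠ [] under Pre_
  let lcol := rc.map (fun row => row.headD 0)                     -- rc[i][0]; rows nonempty under Pre_
  let rcol := rc.map (fun row => row.getLastD 0)                  -- rc[i][-1]
  let rows := rc.map (fun row => (row.drop 1).take (C - 2))       -- [rc[i][j] for j in range(1, C-1)]
  let s := operations.foldl stepA (lcol, rcol, rows)
  let answer := List.replicate R (List.replicate C (0 : Int))
  -- for i, n in enumerate(lcol): answer[i][0] = n
  let answer := s.1.zipIdx.foldl (fun a p => a.set p.2 ((a.getD p.2 []).set 0 p.1)) answer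
  -- for i, n in enumerate(rcol): answer[i][-1] = n   (index -1 = length - 1; rows nonempty under Pre_)
  let answer := s.2.1.zipIdx.foldl
      (fun a p => a.set p.2 ((a.getD p.2 []).set ((a.getD p.2 []).length - 1) p.1)) answer
  -- for i, r in enumerate(rows): for j, n in enumerate(r): answer[i][j+1] = n
  let answer := s.2.2.zipIdx.foldl
      (fun a p => a.set p.2 (p.1.zipIdx.foldl (fun row q => row.set (q.2 + 1) q.1) (a.getD p.2 []))) answer
  answer

-- ===== PORT B =====
-- the body of B's loop: ShiftRow moves the last row to the front; Rotate rebuilds the three kinds of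
-- rows with the border shifted one step clockwise.  g[a][b] with a,b ≥ 0 is getD; g[-1]/g[-2] are
-- getLastD / getD (R-2) (exact under Pre_, where R ≥ 2 and Python would not raise); row[1:-1] = (drop 1).dropLast
def stepB (g : List (List Int)) (op : String) : List (List Int) :=
  if op = "ShiftRow" then
    match g.getLast? with
    | none => g                 -- Python raises IndexError on empty g; unreachable under Pre_
    | some last => last :: g.dropLast
  else if op = "Rotate" then
    let R := g.length
    let top := (g.getD 1 []).headD 0 :: (g.getD 0 []).dropLast
    let bottom := (g.getLastD []).drop 1 ++ [(g.getD (R - 2) []).getLastD 0]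
    let mid := (List.range' 1 (R - 2)).map (fun i =>
      (g.getD (i + 1) []).headD 0 :: ((g.getD i []).drop 1).dropLast ++ [(g.getD (i - 1) []).getLastD 0])
    top :: mid ++ [bottom]
  else g

def solution_alt (rc : List (List Int)) (operations : List String) : List (List Int) :=
  let C := (rc.headD []).length                      -- len(rc[0]); rc ≠ [] under Pre_
  -- [[row[0]] + row[1:C-1] + [row[-1]] for row in rc]; rows nonempty under Pre_
  operations.foldl stepB
    (rc.map (fun row => row.headD 0 :: (row.drop 1).take (C - 2) ++ [row.getLastD 0]))

-- ===== PRECONDITION & SPEC =====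
-- Pre_: at least 2 rows, width C = len(rc[0]) at least 2, every row long enough (≥ C-1) for A's reads.
-- It excludes only inputs on which A raises (short rows, empty input) and matrices of width 1 or height 1,
-- on which A still returns: the border is degenerate there — A's left and right column deques alias the same
-- column / its first and last inner row coincide — and the value A returns is an accident of the deque
-- shuffle, as defensible as any other; B raises or returns another defensible value there.
def Pre_solution (rc : List (List Int)) (operations : List String) : Prop :=
  2 ≤ rc.length ∧ 2 ≤ (rc.headD []).length ∧ ∀ row ∈ rc, (rc.headD []).length - 1 ≤ row.length

instance (rc : List (List Int)) (operations : List String) : Decidable (Pre_solution rc operations) := by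
  unfold Pre_solution; infer_instance

def pvWitness_solution : List (List Int) × List String := ([[1, 2], [3, 4]], ["ShiftRow", "Rotate"])

def Spec_solution (rc : List (List Int)) (operations : List String) (out : List (List Int)) : Prop :=
  out = solution_alt rc operations
instance (rc : List (List Int)) (operations : List String) (out : List (List Int)) :
    Decidable (Spec_solution rc operations out) := by unfold Spec_solution; infer_instance

-- ===== CLAIM (what is proved, stated in full; the proofs are below) =====
def Claim_equal_solution : Prop := ∀ (rc : List (List Int)) (operations : List String),
  Dom_solution rc operations → Pre_solution rc operations →
  Spec_solution rc operations (solution rc operations)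

-- ===== LEMMAS AND PROOFS =====

-- the abstraction from B's whole-matrix state to A's three-deque state
def phiL (g : List (List Int)) : List Int := g.map (fun row => row.headD 0)
def phiR (g : List (List Int)) : List Int := g.map (fun row => row.getLastD 0)
def phiM (g : List (List Int)) : List (List Int) := g.map (fun row => (row.drop 1).dropLast)
def Shape (R C : ℕ) (g : List (List Int)) : Prop := g.length = R ∧ ∀ row ∈ g, row.length = C

-- small scalar list facts ------------------------------------------------------
lemma cons_getLastD {α : Type} (a : α) (s : List α) (d : α) (h : s ≠ []) :
    (a :: s).getLastD d = s.getLastD d := by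
  cases s with
  | nil => exact absurd rfl h
  | cons b t => simp [List.getLastD_eq_getLast?]

lemma getLastD_concat {α : Type} (t : List α) (b d : α) : (t ++ [b]).getLastD d = b := by
  simp [List.getLastD_eq_getLast?]

lemma headD_append_left {α : Type} (t s : List α) (d : α) (h : t ≠ []) :
    (t ++ s).headD d = t.headD d := by
  cases t with
  | nil => exact absurd rfl h
  | cons a t' => simp

lemma map_getLastD_of_ne_nil {α β : Type} (f : α → β) (l : List α) (d : β) (d' : α) (h : l ≠ []) :
    (l.map f).getLastD d = f (l.getLastD d') := by
  obtain ⟨a, ha⟩ := List.getLast?_isSome.mpr h |> Option.isSome_iff_exists.mp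
  simp [List.getLastD_eq_getLast?, List.getLast?_map, ha]

lemma getLastD_mem {α : Type} (l : List α) (d : α) (h : l ≠ []) : l.getLastD d ∈ l := by
  obtain ⟨a, ha⟩ := List.getLast?_isSome.mpr h |> Option.isSome_iff_exists.mp
  simp [List.getLastD_eq_getLast?, ha]
  exact List.mem_of_getLast? ha

lemma dropLast_append_getLastD (l : List Int) (h : l ≠ []) : l.dropLast ++ [l.getLastD 0] = l := by
  induction l with
  | nil => exact absurd rfl h
  | cons a s ih =>
    cases s with
    | nil => simp
    | cons b t =>
      rw [List.dropLast_cons₂, cons_getLastD a (b :: t) 0 (by simp)]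
      simp only [List.cons_append]
      rw [ih (by simp)]

lemma getLastD_drop_one {α : Type} (l : List α) (d : α) (h : 2 ≤ l.length) :
    (l.drop 1).getLastD d = l.getLastD d := by
  cases l with
  | nil => simp at h
  | cons a s =>
    cases s with
    | nil => simp at h
    | cons b t => simp [List.getLastD_eq_getLast?]

lemma tail_append_left {α : Type} (t s : List α) (h : t ≠ []) : (t ++ s).tail = t.tail ++ s := by
  cases t with
  | nil => exact absurd rfl h
  | cons a t' => simp

lemma rowA (row : List Int) (h : 2 ≤ row.length) :
    row.headD 0 :: (row.drop 1).dropLast = row.dropLast := by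
  cases row with
  | nil => simp at h
  | cons a s =>
    cases s with
    | nil => simp at h
    | cons b t => simp [List.dropLast_cons₂]

lemma row_recon (row : List Int) (h : 2 ≤ row.length) :
    row.headD 0 :: ((row.drop 1).dropLast ++ [row.getLastD 0]) = row := by
  cases row with
  | nil => simp at h
  | cons a s =>
    cases s with
    | nil => simp at h
    | cons b t =>
      rw [cons_getLastD a (b :: t) 0 (by simp)]
      simp only [List.headD_cons, List.drop_one, List.tail_cons]
      rw [dropLast_append_getLastD (b :: t) (by simp)]

-- indexed-middle bridge --------------------------------------------------------
lemma map_getD_range' {α β : Type} (d : α) (f : α → β) :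
    ∀ (n k : ℕ) (l : List α), k + n ≤ l.length →
      (List.range' k n).map (fun i => f (l.getD i d)) = ((l.drop k).take n).map f := by
  intro n
  induction n with
  | zero => intro k l h; simp
  | succ n ih =>
    intro k l h
    have hk : k < l.length := by omega
    rw [List.range'_succ, List.map_cons, ih (k + 1) l (by omega), List.getD_eq_getElem l d hk]
    rw [List.drop_eq_getElem_cons hk, List.take_succ_cons, List.map_cons]

lemma map_range'_shift {β : Type} (F : ℕ → β) (a n : ℕ) :
    (List.range' (a + 1) n).map F = (List.range' a n).map (fun i => F (i + 1)) := by
  induction n generalizing a with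
  | zero => rfl
  | succ n ih => rw [List.range'_succ, List.range'_succ, List.map_cons, List.map_cons, ih]

-- loop-shape lemmas for A's three write-back loops ----------------------------
lemma rowFold : ∀ (r row : List Int) (k : ℕ), k + 1 + r.length ≤ row.length →
    (r.zipIdx k).foldl (fun acc q => acc.set (q.2 + 1) q.1) row
      = row.take (k + 1) ++ r ++ row.drop (k + 1 + r.length) := by
  intro r
  induction r with
  | nil => intro row k h; simp
  | cons x xs ih =>
    intro row k h
    rw [List.zipIdx_cons, List.foldl_cons]
    have hk : k + 1 < row.length := by simp at h; omega
    change List.foldl (fun acc q => acc.set (q.2 + 1) q.1) (row.set (k + 1) x) (xs.zipIdx (k + 1)) = _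
    rw [ih (row.set (k + 1) x) (k + 1) (by simp at h ⊢; omega)]
    have hset : row.set (k + 1) x = row.take (k + 1) ++ x :: row.drop (k + 2) := by
      rw [List.set_eq_take_append_cons_drop, if_pos hk]
    have hlenA : (row.take (k + 1)).length = k + 1 := by simp; omega
    rw [hset, List.take_append, List.drop_append, hlenA]
    have h1 : k + 1 + 1 - (k + 1) = 1 := by omega
    have h2 : k + 1 + 1 + xs.length - (k + 1) = 1 + xs.length := by omega
    rw [h1, h2, List.take_of_length_le (by omega),
      List.drop_of_length_le (l := row.take (k + 1)) (by omega)]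
    have h3 : (1:ℕ) + xs.length = xs.length + 1 := by omega
    rw [h3, List.drop_succ_cons, List.take_succ_cons, List.drop_drop]
    have h4 : k + 2 + xs.length = k + 1 + (xs.length + 1) := by omega
    simp [h4]

lemma matFold {γ : Type} (F : List Int → γ → List Int) :
    ∀ (l : List γ) (M : List (List Int)) (k : ℕ), k + l.length ≤ M.length →
      (l.zipIdx k).foldl (fun a p => a.set p.2 (F (a.getD p.2 []) p.1)) M
        = M.take k ++ List.zipWith F (M.drop k) l ++ M.drop (k + l.length) := by
  intro l
  induction l with
  | nil => intro M k h; simp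
  | cons x xs ih =>
    intro M k h
    rw [List.zipIdx_cons, List.foldl_cons]
    have hk : k < M.length := by simp at h; omega
    change List.foldl (fun a p => a.set p.2 (F (a.getD p.2 []) p.1))
        (M.set k (F (M.getD k []) x)) (xs.zipIdx (k + 1)) = _
    rw [ih (M.set k (F (M.getD k []) x)) (k + 1) (by simp at h ⊢; omega)]
    have hset : M.set k (F (M.getD k []) x)
        = M.take k ++ F (M.getD k []) x :: M.drop (k + 1) := by
      rw [List.set_eq_take_append_cons_drop, if_pos hk]
    have hlenA : (M.take k).length = k := by simp; omega
    rw [hset, List.take_append, List.drop_append, List.drop_append, hlenA]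
    have h1 : k + 1 - k = 1 := by omega
    have h2 : k + 1 + xs.length - k = 1 + xs.length := by omega
    rw [h1, h2, List.take_of_length_le (by omega),
      List.drop_of_length_le (l := M.take k) (by omega),
      List.drop_of_length_le (l := M.take k) (by omega)]
    have h3 : (1:ℕ) + xs.length = xs.length + 1 := by omega
    rw [h3, List.drop_succ_cons, List.take_succ_cons, List.drop_drop]
    rw [List.drop_eq_getElem_cons hk, List.getD_eq_getElem M [] hk]
    have h4 : k + 1 + xs.length = k + (xs.length + 1) := by omega
    simp [h4, List.zipWith]

lemma zipWith_map_self {α β γ δ : Type} (F : β → γ → δ) (q : α → β) (f : α → γ) (l : List α) :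
    List.zipWith F (l.map q) (l.map f) = l.map (fun a => F (q a) (f a)) := by
  induction l with
  | nil => rfl
  | cons a t ih => simp [ih]

-- per-operation commutation ----------------------------------------------------
lemma stepB_shift (g : List (List Int)) : stepB g "ShiftRow" = pyRot1 g := by
  unfold stepB pyRot1
  cases h : g.getLast? with
  | none => simp [List.getLast?_eq_none_iff.mp h]
  | some x => simp

lemma map_pyRot1 {α β : Type} (f : α → β) (l : List α) :
    (pyRot1 l).map f = pyRot1 (l.map f) := by
  unfold pyRot1
  cases h : l.getLast? with
  | none => simp [List.getLast?_eq_none_iff.mp h]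
  | some x =>
    have : (l.map f).getLast? = some (f x) := by simp [List.getLast?_map, h]
    simp [this, List.map_dropLast]

lemma stepB_rotate (g : List (List Int)) :
    stepB g "Rotate"
      = ((g.getD 1 []).headD 0 :: (g.getD 0 []).dropLast) ::
        (List.range' 1 (g.length - 2)).map (fun i =>
          (g.getD (i + 1) []).headD 0 ::
            ((g.getD i []).drop 1).dropLast ++ [(g.getD (i - 1) []).getLastD 0]) ++
        [(g.getLastD []).drop 1 ++ [(g.getD (g.length - 2) []).getLastD 0]] := rfl

lemma rotate_comm (C : ℕ) (hC : 2 ≤ C) (g : List (List Int)) (hR : 2 ≤ g.length)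
    (hrow : ∀ row ∈ g, row.length = C) :
    stepA (phiL g, phiR g, phiM g) "Rotate"
      = (phiL (stepB g "Rotate"), phiR (stepB g "Rotate"), phiM (stepB g "Rotate")) := by
  obtain ⟨g0, g1, rest, rfl⟩ : ∃ g0 g1 rest, g = g0 :: g1 :: rest := by
    cases g with
    | nil => simp at hR
    | cons a t =>
      cases t with
      | nil => simp at hR
      | cons b u => exact ⟨a, b, u, rfl⟩
  have hg0 : g0.length = C := hrow _ (by simp)
  have hg1 : g1.length = C := hrow _ (by simp)
  have hGLmem : (g1 :: rest).getLastD [] ∈ g0 :: g1 :: rest :=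
    List.mem_cons_of_mem _ (getLastD_mem _ _ (by simp))
  have hGL : ((g1 :: rest).getLastD []).length = C := hrow _ hGLmem
  have hd0 : g0.dropLast ≠ [] := by
    apply List.ne_nil_of_length_pos; simp [hg0]; omega
  have hdGL : ((g1 :: rest).getLastD []).drop 1 ≠ [] := by
    apply List.ne_nil_of_length_pos; simp only [List.length_drop, hGL]; omega
  have hA : stepA (phiL (g0 :: g1 :: rest), phiR (g0 :: g1 :: rest), phiM (g0 :: g1 :: rest)) "Rotate"
      = ((phiL (g0 :: g1 :: rest)).tail ++
           [((((phiL (g0 :: g1 :: rest)).headD 0 :: (phiM (g0 :: g1 :: rest)).headD []).dropLast ::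
                (phiM (g0 :: g1 :: rest)).tail).getLastD [] ++
              [(((phiL (g0 :: g1 :: rest)).headD 0 :: (phiM (g0 :: g1 :: rest)).headD []).getLastD 0 ::
                  phiR (g0 :: g1 :: rest)).getLastD 0]).headD 0],
         (((phiL (g0 :: g1 :: rest)).headD 0 :: (phiM (g0 :: g1 :: rest)).headD []).getLastD 0 ::
             phiR (g0 :: g1 :: rest)).dropLast,
         (((phiL (g0 :: g1 :: rest)).headD 0 :: (phiM (g0 :: g1 :: rest)).headD []).dropLast ::
              (phiM (g0 :: g1 :: rest)).tail).dropLast ++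
           [((((phiL (g0 :: g1 :: rest)).headD 0 :: (phiM (g0 :: g1 :: rest)).headD []).dropLast ::
                (phiM (g0 :: g1 :: rest)).tail).getLastD [] ++
              [(((phiL (g0 :: g1 :: rest)).headD 0 :: (phiM (g0 :: g1 :: rest)).headD []).getLastD 0 ::
                  phiR (g0 :: g1 :: rest)).getLastD 0]).tail]) := rfl
  rw [stepB_rotate, hA]
  have hrow0 : (phiL (g0 :: g1 :: rest)).headD 0 :: (phiM (g0 :: g1 :: rest)).headD [] = g0.dropLast := by
    show g0.headD 0 :: (g0.drop 1).dropLast = g0.dropLast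
    exact rowA g0 (by omega)
  rw [hrow0]
  have hm1last : (g0.dropLast.dropLast :: (phiM (g0 :: g1 :: rest)).tail).getLastD []
      = (((g1 :: rest).getLastD []).drop 1).dropLast := by
    show (g0.dropLast.dropLast :: (g1 :: rest).map (fun row => (row.drop 1).dropLast)).getLastD [] = _
    rw [cons_getLastD _ _ _ (by simp)]
    exact map_getLastD_of_ne_nil _ _ _ [] (by simp)
  have hz : (g0.dropLast.getLastD 0 :: phiR (g0 :: g1 :: rest)).getLastD 0
      = ((g1 :: rest).getLastD []).getLastD 0 := by
    rw [cons_getLastD _ _ _ (by simp [phiR])]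
    show ((g0 :: g1 :: rest).map (fun row => row.getLastD 0)).getLastD 0 = _
    rw [map_getLastD_of_ne_nil _ _ _ [] (by simp)]
    rw [cons_getLastD _ _ _ (by simp)]
  have h2GL : 2 ≤ ((g1 :: rest).getLastD []).length := by omega
  have hwrow : (((g1 :: rest).getLastD []).drop 1).dropLast ++ [((g1 :: rest).getLastD []).getLastD 0]
      = ((g1 :: rest).getLastD []).drop 1 := by
    rw [← getLastD_drop_one _ 0 h2GL]
    exact dropLast_append_getLastD _ hdGL
  rw [hm1last, hz, hwrow]
  have hGfull : (g0 :: g1 :: rest).getLastD [] = (g1 :: rest).getLastD [] :=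
    cons_getLastD _ _ _ (by simp)
  have hlen2 : (g0 :: g1 :: rest).length - 2 = rest.length := by simp
  rw [hGfull, hlen2]
  have eM1 : (List.range' 1 rest.length).map
        (fun i => ((g1 :: rest).getD i []).headD 0)
      = rest.map (fun row => row.headD 0) := by
    rw [map_getD_range' [] (fun row => row.headD 0) rest.length 1 _ (by simp only [List.length_cons]; omega)]
    simp
  have eM2 : (List.range' 1 rest.length).map
        (fun i => ((g0 :: g1 :: rest).getD (i - 1) []).getLastD 0)
      = ((g0 :: g1 :: rest).take rest.length).map (fun row => row.getLastD 0) := by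
    rw [map_range'_shift (fun i => ((g0 :: g1 :: rest).getD (i - 1) []).getLastD 0) 0 rest.length]
    simp only [Nat.add_sub_cancel]
    exact map_getD_range' [] (fun row => row.getLastD 0) rest.length 0 _ (by simp; omega)
  have eM3 : (List.range' 1 rest.length).map
        (fun i => ((((g0 :: g1 :: rest).getD i []).drop 1)).dropLast)
      = ((g1 :: rest).take rest.length).map (fun row => (row.drop 1).dropLast) := by
    exact map_getD_range' [] (fun row => (row.drop 1).dropLast) rest.length 1 _ (by simp; omega)
  have hidx : rest.length < (g0 :: g1 :: rest).length := by simp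
  have hdl : (g0 :: g1 :: rest).dropLast
      = (g0 :: g1 :: rest).take rest.length ++ [(g0 :: g1 :: rest).getD rest.length []] := by
    rw [List.dropLast_eq_take]
    have h1 : (g0 :: g1 :: rest).length - 1 = rest.length + 1 := by simp
    rw [h1, List.take_add_one, List.getElem?_eq_getElem hidx, List.getD_eq_getElem _ [] hidx]
    rfl
  refine Prod.ext ?_ (Prod.ext ?_ ?_)
  · -- left-column component
    show (phiL (g0 :: g1 :: rest)).tail ++ [(((g1 :: rest).getLastD []).drop 1).headD 0] = _
    simp only [phiL, List.map_cons, List.map_append, List.map_map, List.tail_cons,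
      List.getD_cons_zero, List.getD_cons_succ, Function.comp_def, List.cons_append,
      List.headD_cons, List.map_nil]
    rw [eM1, headD_append_left _ _ _ hdGL]
    try simp
  · -- right-column component
    show (g0.dropLast.getLastD 0 :: phiR (g0 :: g1 :: rest)).dropLast = _
    rw [List.dropLast_cons_of_ne_nil (by simp [phiR])]
    have hdrm : (phiR (g0 :: g1 :: rest)).dropLast
        = ((g0 :: g1 :: rest).dropLast).map (fun row => row.getLastD 0) := (List.map_dropLast).symm
    rw [hdrm, hdl, List.map_append]
    simp only [phiR, List.map_cons, List.map_append, List.map_map, List.map_nil,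
      List.getD_cons_zero, List.getD_cons_succ, Function.comp_def, getLastD_concat]
    rw [eM2, cons_getLastD _ _ _ hd0]
    simp
  · -- inner-rows component
    show (g0.dropLast.dropLast :: (g1 :: rest).map (fun row => (row.drop 1).dropLast)).dropLast
        ++ [(List.drop 1 ((g1 :: rest).getLastD [])).tail] = _
    rw [List.dropLast_cons_of_ne_nil (by simp)]
    have hdrm3 : ((g1 :: rest).map (fun row => (row.drop 1).dropLast)).dropLast
        = ((g1 :: rest).dropLast).map (fun row => (row.drop 1).dropLast) := (List.map_dropLast).symm
    have hdl1 : (g1 :: rest).dropLast = (g1 :: rest).take rest.length := by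
      rw [List.dropLast_eq_take]; simp
    rw [hdrm3, hdl1]
    have eM3' : (List.range' 1 rest.length).map
          (fun i => (((g0 :: g1 :: rest).getD i []).tail).dropLast)
        = ((g1 :: rest).take rest.length).map (fun row => row.tail.dropLast) := by
      have := map_getD_range' [] (fun row => row.tail.dropLast) rest.length 1 (g0 :: g1 :: rest)
        (by simp only [List.length_cons]; omega)
      simpa using this
    simp only [phiM, List.map_cons, List.map_append, List.map_map, List.map_nil,
      List.getD_cons_zero, List.getD_cons_succ, Function.comp_def, List.cons_append,
      List.drop_one, List.tail_cons, List.dropLast_concat]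
    rw [eM3', tail_append_left _ _ (by
      intro hnil
      exact hdGL (by simpa [List.drop_one] using hnil)),
      List.dropLast_concat]
    try simp

lemma shape_step (R C : ℕ) (hR : 2 ≤ R) (hC : 2 ≤ C) (g : List (List Int)) (hg : Shape R C g)
    (op : String) : Shape R C (stepB g op) := by
  obtain ⟨hlen, hrow⟩ := hg
  have hne : g ≠ [] := by intro h; subst h; simp at hlen; omega
  by_cases h1 : op = "ShiftRow"
  · subst h1
    rw [stepB_shift]
    unfold pyRot1
    cases hL : g.getLast? with
    | none => exact absurd (List.getLast?_eq_none_iff.mp hL) hne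
    | some x =>
      refine ⟨by simp [List.length_dropLast]; omega, ?_⟩
      intro row hr
      rcases List.mem_cons.mp hr with h | h
      · exact h ▸ hrow x (List.mem_of_getLast? hL)
      · exact hrow row (List.dropLast_subset g h)
  · by_cases h2 : op = "Rotate"
    · subst h2
      rw [stepB_rotate]
      have hlenD : ∀ i, i < g.length → (g[i]?.getD []).length = C := by
        intro i hi
        rw [List.getElem?_eq_getElem hi]
        exact hrow _ (List.getElem_mem hi)
      have hGL : (g.getLast?.getD []).length = C := by
        rw [← List.getLastD_eq_getLast?]; exact hrow _ (getLastD_mem g [] hne)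
      constructor
      · simp; omega
      · intro row hr
        rcases List.mem_cons.mp hr with h | h
        · subst h
          have := hlenD 0 (by omega)
          have := hlenD 1 (by omega)
          simp [List.length_dropLast, List.getD]
          omega
        rcases List.mem_append.mp h with h | h
        · obtain ⟨i, hi, rfl⟩ := List.mem_map.mp h
          have hi' : 1 ≤ i ∧ i < 1 + (g.length - 2) := List.mem_range'_1.mp hi
          have e1 := hlenD i (by omega)
          have e2 := hlenD (i + 1) (by omega)
          have e3 := hlenD (i - 1) (by omega)
          simp [List.length_dropLast, List.getD]
          omega
        · have : row = (g.getLastD []).drop 1 ++ [(g.getD (g.length - 2) []).getLastD 0] := by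
            simpa using h
          subst this
          simp [List.getD, List.getLastD_eq_getLast?]
          omega
    · simp only [stepB, if_neg h1, if_neg h2]
      exact ⟨hlen, hrow⟩

lemma step_comm (R C : ℕ) (hR : 2 ≤ R) (hC : 2 ≤ C) (g : List (List Int)) (hg : Shape R C g)
    (op : String) :
    stepA (phiL g, phiR g, phiM g) op
      = (phiL (stepB g op), phiR (stepB g op), phiM (stepB g op)) := by
  by_cases h1 : op = "ShiftRow"
  · subst h1
    rw [stepB_shift]
    have hA : stepA (phiL g, phiR g, phiM g) "ShiftRow"
        = (pyRot1 (phiL g), pyRot1 (phiR g), pyRot1 (phiM g)) := rfl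
    rw [hA]
    unfold phiL phiR phiM
    rw [map_pyRot1, map_pyRot1, map_pyRot1]
  · by_cases h2 : op = "Rotate"
    · subst h2
      exact rotate_comm C hC g (hg.1 ▸ hR) hg.2
    · simp only [stepA, stepB, if_neg h1, if_neg h2]

lemma fold_comm (R C : ℕ) (hR : 2 ≤ R) (hC : 2 ≤ C) :
    ∀ (ops : List String) (g : List (List Int)), Shape R C g →
      ops.foldl stepA (phiL g, phiR g, phiM g)
          = (phiL (ops.foldl stepB g), phiR (ops.foldl stepB g), phiM (ops.foldl stepB g))
        ∧ Shape R C (ops.foldl stepB g) := by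
  intro ops
  induction ops with
  | nil => intro g hg; exact ⟨rfl, hg⟩
  | cons op ops ih =>
    intro g hg
    simp only [List.foldl_cons]
    rw [step_comm R C hR hC g hg op]
    exact ih (stepB g op) (shape_step R C hR hC g hg op)

lemma rep_set_drop : ∀ (c : ℕ) (b : Int),
    ((List.replicate (c + 1) (0 : Int)).set c b).drop c = [b] := by
  intro c
  induction c with
  | zero => intro b; simp
  | succ c ih =>
    intro b
    rw [List.replicate_succ, List.set_cons_succ, List.drop_succ_cons, ih]

-- the write-back phase of A reconstructs the matrix ---------------------------
lemma build_eq (R C : ℕ) (hC : 2 ≤ C) (g : List (List Int)) (hg : Shape R C g) :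
    (let answer := List.replicate R (List.replicate C (0 : Int));
     let answer := (phiL g).zipIdx.foldl (fun a p => a.set p.2 ((a.getD p.2 []).set 0 p.1)) answer;
     let answer := (phiR g).zipIdx.foldl
        (fun a p => a.set p.2 ((a.getD p.2 []).set ((a.getD p.2 []).length - 1) p.1)) answer;
     (phiM g).zipIdx.foldl
        (fun a p => a.set p.2 (p.1.zipIdx.foldl (fun row q => row.set (q.2 + 1) q.1) (a.getD p.2 []))) answer)
    = g := by
  obtain ⟨hlen, hrow⟩ := hg
  have hrep : List.replicate R (List.replicate C (0 : Int))
      = g.map (fun _ => List.replicate C (0 : Int)) := by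
    rw [← hlen, ← List.map_const']
  have e1 : (phiL g).zipIdx.foldl (fun a p => a.set p.2 ((a.getD p.2 []).set 0 p.1))
        (List.replicate R (List.replicate C (0 : Int)))
      = g.map (fun r => (List.replicate C (0 : Int)).set 0 (r.headD 0)) := by
    refine Eq.trans (matFold (fun row v => row.set 0 v) (phiL g)
      (List.replicate R (List.replicate C (0 : Int))) 0 (by simp [phiL, hlen])) ?_
    rw [hrep]
    simp only [List.take_zero, List.drop_zero, Nat.zero_add, List.length_map, phiL,
      List.length_map, zipWith_map_self]
    rw [List.drop_of_length_le (by simp)]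
    simp
  have e2 : (phiR g).zipIdx.foldl
        (fun a p => a.set p.2 ((a.getD p.2 []).set ((a.getD p.2 []).length - 1) p.1))
        (g.map (fun r => (List.replicate C (0 : Int)).set 0 (r.headD 0)))
      = g.map (fun r => ((List.replicate C (0 : Int)).set 0 (r.headD 0)).set (C - 1) (r.getLastD 0)) := by
    refine Eq.trans (matFold (fun row v => row.set (row.length - 1) v) (phiR g)
      (g.map (fun r => (List.replicate C (0 : Int)).set 0 (r.headD 0))) 0 (by simp [phiR])) ?_
    simp only [List.take_zero, List.drop_zero, Nat.zero_add, phiR, List.length_map,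
      zipWith_map_self]
    rw [List.drop_of_length_le (by simp)]
    simp
  have e3 : (phiM g).zipIdx.foldl
        (fun a p => a.set p.2 (p.1.zipIdx.foldl (fun row q => row.set (q.2 + 1) q.1) (a.getD p.2 [])))
        (g.map (fun r => ((List.replicate C (0 : Int)).set 0 (r.headD 0)).set (C - 1) (r.getLastD 0)))
      = g.map (fun r => ((r.drop 1).dropLast).zipIdx.foldl (fun row q => row.set (q.2 + 1) q.1)
          (((List.replicate C (0 : Int)).set 0 (r.headD 0)).set (C - 1) (r.getLastD 0))) := by
    refine Eq.trans (matFold (fun row m => m.zipIdx.foldl (fun row q => row.set (q.2 + 1) q.1) row)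
      (phiM g)
      (g.map (fun r => ((List.replicate C (0 : Int)).set 0 (r.headD 0)).set (C - 1) (r.getLastD 0)))
      0 (by simp [phiM])) ?_
    simp only [List.take_zero, List.drop_zero, Nat.zero_add, phiM, List.length_map,
      zipWith_map_self]
    rw [List.drop_of_length_le (by simp)]
    simp
  simp only []
  rw [e1, e2, e3]
  conv_rhs => rw [← List.map_id g]
  apply List.map_congr_left
  intro r hr
  have hrC : r.length = C := hrow r hr
  obtain ⟨c, rfl⟩ : ∃ c, C = c + 2 := ⟨C - 2, by omega⟩
  have hz : (List.replicate (c + 2) (0 : Int)).set 0 (r.headD 0)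
      = r.headD 0 :: List.replicate (c + 1) 0 := by
    rw [List.replicate_succ, List.set_cons_zero]
  have hz2 : (r.headD 0 :: List.replicate (c + 1) (0 : Int)).set (c + 2 - 1) (r.getLastD 0)
      = r.headD 0 :: (List.replicate (c + 1) (0 : Int)).set c (r.getLastD 0) := by
    have : c + 2 - 1 = c + 1 := by omega
    rw [this, List.set_cons_succ]
  have hm : ((r.drop 1).dropLast).length = c := by
    simp [List.length_dropLast, hrC]
  have hfold := rowFold ((r.drop 1).dropLast)
      (r.headD 0 :: (List.replicate (c + 1) (0 : Int)).set c (r.getLastD 0)) 0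
      (by simp only [List.length_dropLast, List.length_drop, List.length_cons, List.length_set,
        List.length_replicate, hrC]; omega)
  rw [hz, hz2, hfold, hm]
  have htake : (r.headD 0 :: (List.replicate (c + 1) (0 : Int)).set c (r.getLastD 0)).take (0 + 1)
      = [r.headD 0] := by simp
  have hdrop : (r.headD 0 :: (List.replicate (c + 1) (0 : Int)).set c (r.getLastD 0)).drop (0 + 1 + c)
      = [r.getLastD 0] := by
    have h01 : 0 + 1 + c = c + 1 := by omega
    rw [h01, List.drop_succ_cons, rep_set_drop]
  rw [htake, hdrop]
  simp only [List.cons_append, List.nil_append, id_eq]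
  exact row_recon r (by omega)

-- ===== VERDICT (by name: the statement is the Claim_ definition above) =====
theorem solution_spec : Claim_equal_solution := by
  unfold Claim_equal_solution
  intro rc ops hdom hpre
  unfold Spec_solution
  obtain ⟨hR2, hC2, hlong⟩ := hpre
  have hshape : Shape rc.length (rc.headD []).length
      (rc.map (fun row =>
        row.headD 0 :: (row.drop 1).take ((rc.headD []).length - 2) ++ [row.getLastD 0])) := by
    constructor
    · simp
    · intro row hr
      obtain ⟨r, hrmem, rfl⟩ := List.mem_map.mp hr
      have := hlong r hrmem
      simp only [List.length_append, List.length_cons, List.length_take, List.length_drop,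
        List.length_nil]
      omega
  have hL0 : phiL (rc.map (fun row =>
        row.headD 0 :: (row.drop 1).take ((rc.headD []).length - 2) ++ [row.getLastD 0]))
      = rc.map (fun row => row.headD 0) := by
    simp only [phiL, List.map_map, Function.comp_def, List.cons_append, List.headD_cons]
  have hR0 : phiR (rc.map (fun row =>
        row.headD 0 :: (row.drop 1).take ((rc.headD []).length - 2) ++ [row.getLastD 0]))
      = rc.map (fun row => row.getLastD 0) := by
    simp only [phiR, List.map_map, Function.comp_def, getLastD_concat]
  have hM0 : phiM (rc.map (fun row =>
        row.headD 0 :: (row.drop 1).take ((rc.headD []).length - 2) ++ [row.getLastD 0]))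
      = rc.map (fun row => (row.drop 1).take ((rc.headD []).length - 2)) := by
    simp only [phiM, List.map_map, Function.comp_def, List.cons_append, List.drop_one,
      List.tail_cons, List.dropLast_concat]
  have hcomm := fold_comm rc.length (rc.headD []).length hR2 hC2 ops _ hshape
  have hbuild := build_eq rc.length (rc.headD []).length hC2
    (ops.foldl stepB (rc.map (fun row =>
      row.headD 0 :: (row.drop 1).take ((rc.headD []).length - 2) ++ [row.getLastD 0]))) hcomm.2
  rw [hL0, hR0, hM0] at hcomm
  simp only [phiL, phiR, phiM] at hcomm hbuild
  show solution rc ops = solution_alt rc ops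
  unfold solution solution_alt
  simp only []
  rw [hcomm.1]
  exact hbuild
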